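-- pv_equiv track=rewrite | github.com/daniel-reich/ubiquitous-fiesta | MFteyMABeuGaga3a7_9.py | color_pattern_times
-- ===== SOURCE A (Python) =====
-- def color_pattern_times(cols):
--   if len(cols) == 0:
--     return 0
--   time = 0
--   x = cols[0]
--   for y in cols:
--     if x != y:
--       time = time + 1
--     time = time + 2
--     x = y
--   return time
-- ===== SOURCE B (Python) =====
-- def color_pattern_times(cols):
--   total = 0
--   n = len(cols)
--   start = 0
--   while start < n:
--     end = start + 1
--     while end < n and cols[end] == cols[start]:
--       end += 1
--     total += 2 * (end - start) + (1 if end < n else 0)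
--     start = end
--   return total
-- ===== Notes on version B (the rewrite author's own statement) =====
-- stated objective: alternative
-- what changed: Traverses the list run by run: an outer loop peels each maximal run of equal adjacent colors and charges 2 per element of the run plus 1 per run boundary, instead of A's element-by-element pass carrying a prev value and a running accumulator.
import Mathlib
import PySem

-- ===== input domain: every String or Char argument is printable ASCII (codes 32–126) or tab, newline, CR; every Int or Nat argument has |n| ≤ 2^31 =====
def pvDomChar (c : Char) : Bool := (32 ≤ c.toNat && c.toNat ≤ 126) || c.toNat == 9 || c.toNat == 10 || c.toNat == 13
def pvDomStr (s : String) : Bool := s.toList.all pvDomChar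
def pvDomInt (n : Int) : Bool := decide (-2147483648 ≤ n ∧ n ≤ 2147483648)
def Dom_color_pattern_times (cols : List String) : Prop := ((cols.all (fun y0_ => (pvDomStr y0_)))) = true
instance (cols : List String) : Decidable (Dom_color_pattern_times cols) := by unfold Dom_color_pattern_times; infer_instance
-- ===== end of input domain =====

-- B traverses the list run by run (peel a maximal run of equal colors, charge 2 per element + 1 per boundary), instead of A's element-wise pass with a prev/accumulator; alternative decomposition, same cost.


-- ===== PORT A =====
-- literal transliteration: empty guard, then a loop carrying (time, x)
def color_pattern_times (cols : List String) : Int :=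
  if cols.length = 0 then 0
  else
    match cols with
    | [] => 0
    | x0 :: _ =>
      (cols.foldl (fun (st : Int × String) y =>
        let t := if st.2 ≠ y then st.1 + 1 else st.1
        (t + 2, y)) ((0 : Int), x0)).1

-- ===== PORT B =====
-- inner while loop of Source B: length of the maximal run of elements equal to x
def pvRun (x : String) : List String → Nat
  | [] => 0
  | y :: ys => if y = x then pvRun x ys + 1 else 0

-- outer while loop of Source B: peel one run at a time, total += 2*runlen + boundary
def color_pattern_times_alt : List String → Int
  | [] => 0
  | x :: rest =>
    let k := pvRun x rest
    2 * ((k : Int) + 1) + (if k < rest.length then 1 else 0) +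
      color_pattern_times_alt (rest.drop k)
termination_by l => l.length
decreasing_by
  simp only [List.length_cons, List.length_drop]
  omega

-- ===== PRECONDITION & SPEC =====
def Spec_color_pattern_times (cols : List String) (out : Int) : Prop := out = color_pattern_times_alt cols
instance (cols : List String) (out : Int) : Decidable (Spec_color_pattern_times cols out) := by unfold Spec_color_pattern_times; infer_instance

-- ===== CLAIM (what is proved, stated in full; the proofs are below) =====
def Claim_equal_color_pattern_times : Prop := ∀ (cols : List String), Dom_color_pattern_times cols → Spec_color_pattern_times cols (color_pattern_times cols)

-- ===== LEMMAS AND PROOFS =====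

-- number of adjacent changes along the chain x :: l
def pvDC (x : String) (l : List String) : Int :=
  match l with
  | [] => 0
  | y :: ys => (if x ≠ y then 1 else 0) + pvDC y ys

-- changes counted tail-first for a whole list
def pvTail (l : List String) : Int :=
  match l with
  | [] => 0
  | x :: ys => pvDC x ys

theorem pvLoopA (l : List String) : ∀ (x : String) (t : Int),
    (l.foldl (fun (st : Int × String) y =>
      let t := if st.2 ≠ y then st.1 + 1 else st.1
      (t + 2, y)) (t, x)).1 = t + 2 * l.length + pvDC x l := by
  induction l with
  | nil => intro x t; simp [pvDC]
  | cons y ys ih =>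
    intro x t
    simp only [List.foldl_cons, pvDC]
    rw [ih]
    by_cases h : x = y <;> (simp [h]; ring)

theorem pvRun_le (x : String) (l : List String) : pvRun x l ≤ l.length := by
  induction l with
  | nil => simp [pvRun]
  | cons y ys ih => by_cases h : y = x <;> simp [pvRun, h] <;> omega

-- peeling a run: the change count splits as one boundary (if any) plus the rest
theorem pvDC_run (l : List String) : ∀ (x : String),
    pvDC x l = (if pvRun x l < l.length then 1 else 0) + pvTail (l.drop (pvRun x l)) := by
  induction l with
  | nil => intro x; simp [pvDC, pvRun, pvTail]
  | cons y ys ih =>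
    intro x
    by_cases h : y = x
    · subst h
      simp only [pvDC, pvRun, if_pos rfl, List.length_cons, List.drop_succ_cons]
      rw [ih y]
      have := pvRun_le y ys
      by_cases hk : pvRun y ys < ys.length <;> simp [hk] <;> omega
    · have hne : x ≠ y := fun e => h e.symm
      simp [pvDC, pvRun, h, hne, pvTail, Nat.zero_lt_succ]

theorem pvAltEq (n : Nat) : ∀ (l : List String), l.length ≤ n →
    color_pattern_times_alt l = 2 * l.length + pvTail l := by
  induction n with
  | zero =>
    intro l hl
    have : l = [] := List.length_eq_zero_iff.mp (Nat.le_zero.mp hl)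
    subst this; simp [color_pattern_times_alt, pvTail]
  | succ n ih =>
    intro l hl
    match l with
    | [] => simp [color_pattern_times_alt, pvTail]
    | x :: rest =>
      rw [color_pattern_times_alt]
      have hr := pvRun_le x rest
      have hlen : (rest.drop (pvRun x rest)).length ≤ n := by
        simp only [List.length_cons] at hl
        simp only [List.length_drop]; omega
      rw [ih _ hlen, pvTail, pvDC_run rest x]
      simp only [List.length_cons, List.length_drop]
      by_cases hk : pvRun x rest < rest.length <;> simp [hk] <;> omega

-- ===== VERDICT =====
theorem color_pattern_times_spec : Claim_equal_color_pattern_times := by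
  intro cols _
  unfold Spec_color_pattern_times color_pattern_times
  rw [pvAltEq cols.length cols (le_refl _)]
  match cols with
  | [] => simp [pvTail]
  | x0 :: rest =>
    simp only [List.length_cons, pvTail]
    rw [pvLoopA]
    simp [pvDC]
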